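-- pv_equiv track=rewrite | github.com/tgrx/Z22 | homeworks/kirill_shevchuk/hw05/level04_failure.py | host
-- ===== SOURCE A (Python) =====
-- def splitt(string):
--     lst = []
--     counter = 0
--     lenght = len(string)
--     for i in range(lenght):
--         if string[i] == "/" or string[i] == ":" or string[i] == "@":
--             lst.append(string[counter:i])
--             counter = i + 1
--     return lst
--
-- def host(string):
--     if string is None:
--         return ""
--     stroka = splitt(string)
--     lenght = len(stroka)
--     for i in range(lenght):
--         if "." in stroka[i]:
--             return stroka[i]
--     return ""
-- ===== SOURCE B (Python) =====
-- def host(string):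
--     if string is None:
--         return ""
--     start = 0
--     dot = False
--     for i, ch in enumerate(string):
--         if ch == "/" or ch == ":" or ch == "@":
--             if dot:
--                 return string[start:i]
--             start = i + 1
--             dot = False
--         elif ch == ".":
--             dot = True
--     return ""
-- ===== Notes on version B (the rewrite author's own statement) =====
-- stated objective: alternative
-- what changed: Fuses splitt and the search into one single-pass character scan that tracks the segment start and a dot-seen flag, never materialising the list of segments; same O(n) time, O(1) extra space instead of O(n).
import Mathlib
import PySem

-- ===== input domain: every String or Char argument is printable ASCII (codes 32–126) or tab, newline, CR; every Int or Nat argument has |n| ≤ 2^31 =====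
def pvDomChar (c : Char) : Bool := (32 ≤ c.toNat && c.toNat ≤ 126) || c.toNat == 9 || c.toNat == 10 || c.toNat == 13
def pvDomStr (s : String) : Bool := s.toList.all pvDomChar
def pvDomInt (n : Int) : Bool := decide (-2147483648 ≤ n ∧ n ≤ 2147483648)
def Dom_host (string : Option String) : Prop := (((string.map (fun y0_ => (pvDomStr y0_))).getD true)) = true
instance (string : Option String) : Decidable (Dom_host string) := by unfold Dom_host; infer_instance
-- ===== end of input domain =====

-- B fuses splitt and the search into one single-pass scan with a segment-start index
-- and a dot-seen flag, never building the list of segments (constant extra space).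

-- ===== PORT A =====
-- splitt's for-loop over range(len(string)): structural recursion over the remaining
-- characters, carrying the index i, counter and the accumulated list lst.
-- string[counter:i] with 0 ≤ counter ≤ i ≤ len is exactly (drop counter).take (i-counter).
def splittLoop (full : List Char) : List Char → Nat → Nat → List (List Char) → List (List Char)
  | [], _i, _counter, lst => lst
  | c :: rest, i, counter, lst =>
    if c = '/' ∨ c = ':' ∨ c = '@' then
      splittLoop full rest (i + 1) (i + 1) (lst ++ [(full.drop counter).take (i - counter)])
    else
      splittLoop full rest (i + 1) counter lst

def splitt (s : String) : List (List Char) :=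
  splittLoop s.toList s.toList 0 0 []

-- host's for-loop with early return over the segment list.
def hostLoop : List (List Char) → String
  | [] => ""
  | seg :: rest => if '.' ∈ seg then String.ofList seg else hostLoop rest

def host (string : Option String) : String :=
  match string with
  | none => ""
  | some s => hostLoop (splitt s)

-- ===== PORT B =====
-- single pass: i is the current index, start the segment start, dot the flag.
def hostAltLoop (full : List Char) : List Char → Nat → Nat → Bool → String
  | [], _i, _start, _dot => ""
  | c :: rest, i, start, dot =>
    if c = '/' ∨ c = ':' ∨ c = '@' then
      if dot then String.ofList ((full.drop start).take (i - start))
      else hostAltLoop full rest (i + 1) (i + 1) false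
    else if c = '.' then hostAltLoop full rest (i + 1) start true
    else hostAltLoop full rest (i + 1) start dot

def host_alt (string : Option String) : String :=
  match string with
  | none => ""
  | some s => hostAltLoop s.toList s.toList 0 0 false

-- ===== PRECONDITION & SPEC =====
def Spec_host (string : Option String) (out : String) : Prop := out = host_alt string
instance (string : Option String) (out : String) : Decidable (Spec_host string out) := by unfold Spec_host; infer_instance

-- ===== CLAIM (what is proved, stated in full; the proofs are below) =====
def Claim_equal_host : Prop := ∀ (string : Option String), Dom_host string → Spec_host string (host string)

-- ===== LEMMAS AND PROOFS =====

lemma splittLoop_acc (full : List Char) (rest : List Char) :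
    ∀ (i counter : Nat) (lst : List (List Char)),
    splittLoop full rest i counter lst = lst ++ splittLoop full rest i counter [] := by
  induction rest with
  | nil => intro i counter lst; simp [splittLoop]
  | cons c rest ih =>
    intro i counter lst
    simp only [splittLoop, List.nil_append]
    split
    · rw [ih (i + 1) (i + 1), ih (i + 1) (i + 1) ([(full.drop counter).take (i - counter)])]
      simp
    · exact ih (i + 1) counter lst

lemma seg_extend (full : List Char) (counter i : Nat) (c : Char) (rest : List Char)
    (h : full.drop i = c :: rest) (hc : counter ≤ i) :
    (full.drop counter).take (i + 1 - counter) = (full.drop counter).take (i - counter) ++ [c] := by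
  have hget : (full.drop counter)[i - counter]? = some c := by
    rw [List.getElem?_drop]
    have h1 : counter + (i - counter) = i := by omega
    rw [h1]
    have h2 : (full.drop i)[0]? = full[i]? := by simp
    rw [← h2, h]
    rfl
  have hk : i + 1 - counter = (i - counter) + 1 := by omega
  rw [hk, List.take_add_one, hget]
  rfl

lemma drop_succ_of_drop (full : List Char) (i : Nat) (c : Char) (rest : List Char)
    (h : full.drop i = c :: rest) : full.drop (i + 1) = rest := by
  have : full.drop (i + 1) = (full.drop i).drop 1 := by
    rw [List.drop_drop]
  rw [this, h]
  rfl

lemma host_main (full : List Char) (rest : List Char) :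
    ∀ (i counter : Nat) (dot : Bool),
    full.drop i = rest → counter ≤ i →
    (dot = true ↔ '.' ∈ (full.drop counter).take (i - counter)) →
    hostLoop (splittLoop full rest i counter []) = hostAltLoop full rest i counter dot := by
  induction rest with
  | nil => intro i counter dot _ _ _; simp [splittLoop, hostLoop, hostAltLoop]
  | cons c rest ih =>
    intro i counter dot hdrop hle hdot
    have hrest : full.drop (i + 1) = rest := drop_succ_of_drop full i c rest hdrop
    simp only [splittLoop, hostAltLoop]
    by_cases hdelim : c = '/' ∨ c = ':' ∨ c = '@'
    · simp only [if_pos hdelim]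
      rw [splittLoop_acc]
      show hostLoop (((full.drop counter).take (i - counter)) :: splittLoop full rest (i + 1) (i + 1) []) = _
      rw [hostLoop]
      by_cases hmem : '.' ∈ (full.drop counter).take (i - counter)
      · have : dot = true := hdot.mpr hmem
        rw [if_pos hmem, this, if_pos rfl]
      · have : dot = false := by
          cases dot with
          | true => exact absurd (hdot.mp rfl) hmem
          | false => rfl
        rw [if_neg hmem, this, if_neg (by simp)]
        exact ih (i + 1) (i + 1) false hrest (le_refl _) (by simp)
    · simp only [if_neg hdelim]
      have hext := seg_extend full counter i c rest hdrop hle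
      by_cases hdotc : c = '.'
      · rw [if_pos hdotc]
        refine ih (i + 1) counter true hrest (by omega) ?_
        rw [hext, hdotc]
        simp
      · rw [if_neg hdotc]
        refine ih (i + 1) counter dot hrest (by omega) ?_
        rw [hext]
        simp only [List.mem_append, List.mem_singleton]
        constructor
        · intro h; exact Or.inl (hdot.mp h)
        · intro h
          rcases h with h | h
          · exact hdot.mpr h
          · exact absurd h.symm hdotc

-- ===== VERDICT (by name: the statement is the Claim_ definition above) =====
theorem host_spec : Claim_equal_host := by
  intro string _
  unfold Spec_host
  cases string with
  | none => rfl
  | some s =>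
    exact host_main s.toList s.toList 0 0 false rfl (le_refl 0) (by simp)
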